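-- pv_equiv track=rewrite | github.com/whiteshards/betsync | Cogs/games/poker.py | get_winning_cards
-- ===== SOURCE A (Python) =====
-- def get_winning_cards(cards, hand_type):
--     # Return indices of the cards that make up the winning hand
--     ranks = [(i, card[0]) for i, card in enumerate(cards)]
--
--     # Convert face cards to numbers
--     rank_values = []
--     for i, rank in ranks:
--         if rank == 'A':
--             rank_values.append((i, 14))
--         elif rank == 'K':
--             rank_values.append((i, 13))
--         elif rank == 'Q':
--             rank_values.append((i, 12))
--         elif rank == 'J':
--             rank_values.append((i, 11))
--         else:
--             rank_values.append((i, int(rank)))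
--
--     # Count occurrences of each rank
--     rank_counts = {}
--     for i, r in rank_values:
--         if r in rank_counts:
--             rank_counts[r].append(i)
--         else:
--             rank_counts[r] = [i]
--
--     if hand_type == "Royal Flush" or hand_type == "Straight Flush" or hand_type == "Flush":
--         # All cards are part of the winning hand
--         return [True, True, True, True, True]
--
--     if hand_type == "Straight":
--         # All cards are part of the winning hand
--         return [True, True, True, True, True]
--
--     if hand_type == "Four of a Kind":
--         winning_indices = []
--         for r, indices in rank_counts.items():
--             if len(indices) == 4:
--                 winning_indices = indices
--                 break
--         result = [False] * 5
--         for idx in winning_indices: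
--             result[idx] = True
--         return result
--
--     if hand_type == "Full House":
--         three_kind = []
--         pair = []
--         for r, indices in rank_counts.items():
--             if len(indices) == 3:
--                 three_kind = indices
--             elif len(indices) == 2:
--                 pair = indices
--         result = [False] * 5
--         for idx in three_kind + pair:
--             result[idx] = True
--         return result
--
--     if hand_type == "Three of a Kind":
--         winning_indices = []
--         for r, indices in rank_counts.items():
--             if len(indices) == 3:
--                 winning_indices = indices
--                 break
--         result = [False] * 5
--         for idx in winning_indices:
--             result[idx] = True
--         return result
--
--     if hand_type == "Two Pair":
--         pairs = []
--         for r, indices in rank_counts.items():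
--             if len(indices) == 2:
--                 pairs.extend(indices)
--         result = [False] * 5
--         for idx in pairs:
--             result[idx] = True
--         return result
--
--     if hand_type == "One Pair":
--         winning_indices = []
--         for r, indices in rank_counts.items():
--             if len(indices) == 2:
--                 winning_indices = indices
--                 break
--         result = [False] * 5
--         for idx in winning_indices:
--             result[idx] = True
--         return result
--
--     # High Card - no winning combination
--     return [False, False, False, False, False]
-- ===== SOURCE B (Python) =====
-- def _card_value(card):
--     r = card[0]
--     if r == 'A':
--         return 14
--     if r == 'K':
--         return 13
--     if r == 'Q':
--         return 12
--     if r == 'J':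
--         return 11
--     return int(r)
--
--
-- def get_winning_cards(cards, hand_type):
--     # Flat count-based marking: no dict of index lists, no in-place slot writes.
--     if hand_type in ("Royal Flush", "Straight Flush", "Flush", "Straight"):
--         return [True] * 5
--     vals = [_card_value(c) for c in cards]
--     counts = [vals.count(v) for v in vals]
--     if hand_type == "Four of a Kind":
--         wanted = (4,)
--     elif hand_type == "Full House":
--         wanted = (2, 3)
--     elif hand_type == "Three of a Kind":
--         wanted = (3,)
--     elif hand_type in ("Two Pair", "One Pair"):
--         wanted = (2,)
--     else:
--         wanted = ()
--     return [i < len(counts) and counts[i] in wanted for i in range(5)]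
-- ===== Notes on version B (the rewrite author's own statement) =====
-- stated objective: simpler
-- what changed: B replaces A's dict of rank->index-lists with per-branch first/last-match scans and in-place slot writes by a flat per-card occurrence-count list and a single comprehension that marks card i iff its rank's count is in the set of counts that hand_type asks for.
-- outside the precondition, e.g. on get_winning_cards(['xh'], 'One Pair'): A raises ValueError, B raises ValueError
import Mathlib
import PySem

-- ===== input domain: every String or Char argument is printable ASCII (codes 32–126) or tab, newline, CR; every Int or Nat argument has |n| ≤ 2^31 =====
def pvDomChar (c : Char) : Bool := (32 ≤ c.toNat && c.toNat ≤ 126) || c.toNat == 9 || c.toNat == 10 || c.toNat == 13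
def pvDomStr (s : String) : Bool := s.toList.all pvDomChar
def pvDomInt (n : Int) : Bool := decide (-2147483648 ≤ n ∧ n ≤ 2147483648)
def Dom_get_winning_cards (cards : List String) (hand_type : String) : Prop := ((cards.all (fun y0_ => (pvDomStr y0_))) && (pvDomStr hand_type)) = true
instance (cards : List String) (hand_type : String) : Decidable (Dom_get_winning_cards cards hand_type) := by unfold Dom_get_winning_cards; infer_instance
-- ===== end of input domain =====

-- B marks each of the 5 result slots from a flat per-card rank-count list instead of A's
-- dict of rank -> index lists with per-branch first/last scans and in-place slot writes (objective: simpler).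

-- ===== PORT A =====

-- 'for r, indices in rank_counts.items(): if len(indices) == n: winning_indices = indices; break'
def pyFirstWith (l : List (Int × List Int)) (n : Nat) : List Int :=
  match l with
  | [] => []
  | p :: t => if p.2.length = n then p.2 else pyFirstWith t n

-- 'result = [False]*5; for idx in idxs: result[idx] = True' — idx is a 0-based enumerate
-- index, nonnegative and (under Pre_) < 5, so '.set idx.toNat' is exact there
def pySetTrues (idxs : List Int) : List Bool :=
  idxs.foldl (fun res idx => res.set idx.toNat true) (List.replicate 5 false)

def get_winning_cards (cards : List String) (hand_type : String) : List Bool :=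
  -- card[0]: pyGet? is none = IndexError on an empty card (outside Pre_)
  let ranks : List (Int × Char) :=
    (PySem.List.enumerate cards).map (fun p => (p.1, (PySem.Str.pyGet? p.2 0).getD ' '))
  -- int(rank): ofStr? is none = ValueError on a non-digit (outside Pre_)
  let rank_values : List (Int × Int) := ranks.foldl (fun acc p =>
      if p.2 = 'A' then acc ++ [(p.1, 14)]
      else if p.2 = 'K' then acc ++ [(p.1, 13)]
      else if p.2 = 'Q' then acc ++ [(p.1, 12)]
      else if p.2 = 'J' then acc ++ [(p.1, 11)]
      else acc ++ [(p.1, (PySem.Int.ofStr? (String.ofList [p.2])).getD 0)]) []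
  let rank_counts : PySem.Dict Int (List Int) := rank_values.foldl (fun d p =>
      if d.contains p.2 then d.modify p.2 [] (fun l => l ++ [p.1]) else d.insert p.2 [p.1])
    PySem.Dict.empty
  if hand_type = "Royal Flush" ∨ hand_type = "Straight Flush" ∨ hand_type = "Flush" then
    [true, true, true, true, true]
  else if hand_type = "Straight" then
    [true, true, true, true, true]
  else if hand_type = "Four of a Kind" then
    pySetTrues (pyFirstWith rank_counts.items 4)
  else if hand_type = "Full House" then
    let tp := rank_counts.items.foldl (fun (s : List Int × List Int) p =>
        if p.2.length = 3 then (p.2, s.2)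
        else if p.2.length = 2 then (s.1, p.2)
        else s) ([], [])
    pySetTrues (tp.1 ++ tp.2)
  else if hand_type = "Three of a Kind" then
    pySetTrues (pyFirstWith rank_counts.items 3)
  else if hand_type = "Two Pair" then
    pySetTrues (rank_counts.items.foldl (fun acc p =>
        if p.2.length = 2 then acc ++ p.2 else acc) [])
  else if hand_type = "One Pair" then
    pySetTrues (pyFirstWith rank_counts.items 2)
  else
    [false, false, false, false, false]

-- ===== PORT B =====

-- _card_value(card): card[0] (none = IndexError) then the rank chain; int(r) none = ValueError
def cardValue (card : String) : Int :=
  let r := (PySem.Str.pyGet? card 0).getD ' '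
  if r = 'A' then 14
  else if r = 'K' then 13
  else if r = 'Q' then 12
  else if r = 'J' then 11
  else (PySem.Int.ofStr? (String.ofList [r])).getD 0

def get_winning_cards_alt (cards : List String) (hand_type : String) : List Bool :=
  if hand_type = "Royal Flush" ∨ hand_type = "Straight Flush" ∨ hand_type = "Flush" ∨
      hand_type = "Straight" then
    List.replicate 5 true
  else
    let vals := cards.map cardValue
    let counts : List Int := vals.map (fun v => (vals.count v : Int))
    let wanted : List Int :=
      if hand_type = "Four of a Kind" then [4]
      else if hand_type = "Full House" then [2, 3]
      else if hand_type = "Three of a Kind" then [3]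
      else if hand_type = "Two Pair" ∨ hand_type = "One Pair" then [2]
      else []
    (PySem.List.pyRange 0 5 1).map (fun i =>
      decide (i < (counts.length : Int)) && wanted.contains (PySem.List.pyGetD counts i 0))

-- ===== PRECONDITION & SPEC =====

-- card has a first character and it parses as a rank (A/K/Q/J or a digit); otherwise A raises
def validCard (c : String) : Bool :=
  match PySem.Str.pyGet? c 0 with
  | none => false
  | some ch => ch == 'A' || ch == 'K' || ch == 'Q' || ch == 'J' ||
      (PySem.Int.ofStr? (String.ofList [ch])).isSome

-- the distinct rank values occurring exactly twice in the hand
def pairRanks (cards : List String) : List Int :=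
  (PySem.List.dedup (cards.map cardValue)).filter (fun r => (cards.map cardValue).count r == 2)

-- Pre_ restricts to the function's natural domain, a hand of at most 5 cards each starting with a
-- rank character (on longer hands A raises IndexError or picks one of several quads by dict order;
-- on a bad rank character A raises ValueError/IndexError), and excludes the defensible corner of a
-- hand_type of "One Pair"/"Full House" over a board holding two distinct pairs, where A marks just
-- one pair chosen by accidental dict order while B marks every card whose rank count fits.
def Pre_get_winning_cards (cards : List String) (hand_type : String) : Prop :=
  cards.length ≤ 5 ∧ cards.all validCard = true ∧
  ¬((hand_type = "One Pair" ∨ hand_type = "Full House") ∧ 2 ≤ (pairRanks cards).length)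

instance (cards : List String) (hand_type : String) : Decidable (Pre_get_winning_cards cards hand_type) := by
  unfold Pre_get_winning_cards; infer_instance

def pvWitness_get_winning_cards : List String × String := (["Ah", "Ad", "Kh", "Kd", "2c"], "Two Pair")

def Spec_get_winning_cards (cards : List String) (hand_type : String) (out : List Bool) : Prop :=
  out = get_winning_cards_alt cards hand_type
instance (cards : List String) (hand_type : String) (out : List Bool) : Decidable (Spec_get_winning_cards cards hand_type out) := by
  unfold Spec_get_winning_cards; infer_instance

-- ===== CLAIM (what is proved, stated in full; the proofs are below) =====
def Claim_equal_get_winning_cards : Prop := ∀ (cards : List String) (hand_type : String), Dom_get_winning_cards cards hand_type → Pre_get_winning_cards cards hand_type → Spec_get_winning_cards cards hand_type (get_winning_cards cards hand_type)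

-- ===== LEMMAS AND PROOFS =====

def charVal (ch : Char) : Int :=
  if ch = 'A' then 14 else if ch = 'K' then 13 else if ch = 'Q' then 12
  else if ch = 'J' then 11 else (PySem.Int.ofStr? (String.ofList [ch])).getD 0

theorem cardValue_eq_charVal (c : String) :
    cardValue c = charVal ((PySem.Str.pyGet? c 0).getD ' ') := rfl

def occ (vals : List Int) (r : Int) : List Int :=
  ((PySem.List.enumerate vals).filter (fun p => p.2 == r)).map (·.1)

theorem rank_values_eq (l : List (Int × Char)) (acc : List (Int × Int)) :
    l.foldl (fun acc p =>
      if p.2 = 'A' then acc ++ [(p.1, 14)]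
      else if p.2 = 'K' then acc ++ [(p.1, 13)]
      else if p.2 = 'Q' then acc ++ [(p.1, 12)]
      else if p.2 = 'J' then acc ++ [(p.1, 11)]
      else acc ++ [(p.1, (PySem.Int.ofStr? (String.ofList [p.2])).getD 0)]) acc
    = acc ++ l.map (fun p => (p.1, charVal p.2)) := by
  have hb : (fun (acc : List (Int × Int)) (p : Int × Char) =>
      if p.2 = 'A' then acc ++ [(p.1, 14)]
      else if p.2 = 'K' then acc ++ [(p.1, 13)]
      else if p.2 = 'Q' then acc ++ [(p.1, 12)]
      else if p.2 = 'J' then acc ++ [(p.1, 11)]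
      else acc ++ [(p.1, (PySem.Int.ofStr? (String.ofList [p.2])).getD 0)])
      = fun acc p => acc ++ [(p.1, charVal p.2)] := by
    funext acc p; simp only [charVal]; split_ifs <;> rfl
  rw [hb, PySem.List.foldl_append_singleton_eq_map]

theorem enumerate_map {α β : Type} (f : α → β) (l : List α) (s : Int) :
    PySem.List.enumerate (l.map f) s = (PySem.List.enumerate l s).map (fun p => (p.1, f p.2)) := by
  induction l generalizing s with
  | nil => rfl
  | cons x t ih => simp [PySem.List.enumerate_cons, ih]

theorem dict_step_eq (d : PySem.Dict Int (List Int)) (p : Int × Int) :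
    (if d.contains p.2 then d.modify p.2 [] (fun l => l ++ [p.1]) else d.insert p.2 [p.1])
    = d.modify p.2 [] (fun l => l ++ [p.1]) := by
  by_cases h : d.contains p.2 = true
  · simp [h]
  · simp only [Bool.not_eq_true] at h
    simp [h, PySem.Dict.modify, PySem.Dict.getD_of_not_contains d [] h]

theorem dict_items_eq (vals : List Int) :
    ((PySem.List.enumerate vals).foldl (fun d p =>
        if d.contains p.2 then d.modify p.2 [] (fun l => l ++ [p.1]) else d.insert p.2 [p.1])
      PySem.Dict.empty).items
    = (PySem.List.dedup vals).map (fun r => (r, occ vals r)) := by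
  have hb : (fun (d : PySem.Dict Int (List Int)) (p : Int × Int) =>
      if d.contains p.2 then d.modify p.2 [] (fun l => l ++ [p.1]) else d.insert p.2 [p.1])
      = fun d p => d.modify p.2 [] (fun l => l ++ [p.1]) := by
    funext d p; exact dict_step_eq d p
  rw [hb]
  let D := (PySem.List.enumerate vals).foldl (fun d p => d.modify p.2 [] (fun l => l ++ [p.1])) PySem.Dict.empty
  have hD : D = (PySem.List.enumerate vals).foldl (fun d p => d.modify p.2 [] (fun l => l ++ [p.1])) PySem.Dict.empty := rfl
  show D.items = _
  have hkeys : D.keys = PySem.List.dedup vals := by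
    rw [hD, PySem.Dict.keys_foldl_modify_key (PySem.List.enumerate vals) (fun p => p.2) [] (fun _ p => fun l => l ++ [p.1])]
    rw [PySem.Dict.keys_empty, PySem.List.map_snd_enumerate, PySem.List.dedup_eq_ofList]
    rfl
  have hnd : D.keys.Nodup := by rw [hkeys]; exact PySem.List.nodup_dedup vals
  have hget : ∀ c, D.getD c [] = occ vals c := by
    intro c
    have hswap : D = ((PySem.List.enumerate vals).map (fun p => (p.2, p.1))).foldl
        (fun d q => d.modify q.1 [] (fun l => l ++ [q.2])) PySem.Dict.empty := by
      rw [hD, List.foldl_map]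
    rw [hswap, PySem.Dict.getD_foldl_modify_append]
    simp [occ, List.filter_map, List.map_map, Function.comp_def]
  rw [PySem.Dict.items_eq_map_keys D hnd [], hkeys]
  exact List.map_congr_left (fun r _ => by rw [hget r])

theorem countP_enumerate (vals : List Int) (r : Int) (s : Int) :
    (PySem.List.enumerate vals s).countP (fun p => p.2 == r) = vals.count r := by
  induction vals generalizing s with
  | nil => rfl
  | cons x t ih =>
    rw [PySem.List.enumerate_cons, List.countP_cons, List.count_cons, ih]

theorem length_occ (vals : List Int) (r : Int) : (occ vals r).length = vals.count r := by
  simp only [occ, List.length_map, ← List.countP_eq_length_filter]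
  exact countP_enumerate vals r 0

theorem mem_occ_iff (vals : List Int) (r : Int) (j : Nat) :
    ((j : Int) ∈ occ vals r) ↔ ∃ h : j < vals.length, vals[j] = r := by
  simp only [occ, List.mem_map, List.mem_filter, PySem.List.mem_enumerate_iff]
  constructor
  · rintro ⟨p, ⟨⟨k, hk, rfl⟩, hr⟩, h1⟩
    simp at h1 hr
    subst h1
    exact ⟨hk, hr⟩
  · rintro ⟨h, hr⟩
    exact ⟨((j : Int), vals[j]), ⟨⟨j, h, by simp⟩, by simp [hr]⟩, rfl⟩

theorem mem_occ_bounds (vals : List Int) (r i : Int) (h : i ∈ occ vals r) :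
    0 ≤ i ∧ i < (vals.length : Int) := by
  simp only [occ, List.mem_map, List.mem_filter, PySem.List.mem_enumerate_iff] at h
  obtain ⟨p, ⟨⟨k, hk, rfl⟩, -⟩, rfl⟩ := h
  simp
  omega

theorem length_foldl_set (L : List Int) (res : List Bool) :
    (L.foldl (fun r i => r.set i.toNat true) res).length = res.length := by
  induction L generalizing res with
  | nil => rfl
  | cons x t ih => simp [ih]

theorem getElem_foldl_set (L : List Int) (res : List Bool) (h0 : ∀ i ∈ L, 0 ≤ i)
    (j : Nat) (hj : j < res.length) :
    (L.foldl (fun r i => r.set i.toNat true) res)[j]'(by rw [length_foldl_set]; exact hj)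
    = (res[j] || L.any (fun i => i == (j : Int))) := by
  induction L generalizing res with
  | nil => simp
  | cons x t ih =>
    have hx : 0 ≤ x := h0 x (by simp)
    have h0' : ∀ i ∈ t, 0 ≤ i := fun i hi => h0 i (by simp [hi])
    simp only [List.foldl_cons]
    rw [ih (res.set x.toNat true) h0' (by simpa using hj)]
    by_cases hxj : x = (j : Int)
    · subst hxj
      simp [List.getElem_set, Int.toNat_of_nonneg hx]
    · have hne : x.toNat ≠ j := by omega
      have hbx : (x == (j : Int)) = false := beq_eq_false_iff_ne.mpr hxj
      simp [List.getElem_set, hne, hbx]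

theorem filter_subsingleton {S : List Int} {P : Int → Bool} (hnd : S.Nodup)
    (huniq : ∀ r1 r2, r1 ∈ S → r2 ∈ S → P r1 → P r2 → r1 = r2) :
    S.filter P = [] ∨ ∃ r0, S.filter P = [r0] ∧ P r0 ∧ r0 ∈ S := by
  induction S with
  | nil => left; rfl
  | cons x t ih =>
    have hnd' := hnd.of_cons
    have huniq' : ∀ r1 r2, r1 ∈ t → r2 ∈ t → P r1 → P r2 → r1 = r2 :=
      fun r1 r2 h1 h2 => huniq r1 r2 (by simp [h1]) (by simp [h2])
    by_cases hx : P x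
    · right
      refine ⟨x, ?_, hx, by simp⟩
      have ht : t.filter P = [] := by
        rcases ih hnd' huniq' with h | ⟨r0, hf, hr0, hmem⟩
        · exact h
        · exfalso
          have : r0 = x := (huniq r0 x (by simp [hmem]) (by simp) hr0 hx)
          subst this
          exact (List.nodup_cons.mp hnd).1 hmem
      simp [List.filter_cons, hx, ht]
    · rcases ih hnd' huniq' with h | ⟨r0, hf, hr0, hmem⟩
      · left; simp [List.filter_cons, hx, h]
      · right; exact ⟨r0, by simp [List.filter_cons, hx, hf], hr0, by simp [hmem]⟩

theorem pyFirstWith_map (vals : List Int) (S : List Int) (n : Nat) :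
    pyFirstWith (S.map (fun r => (r, occ vals r))) n
    = ((S.filter (fun r => vals.count r == n)).map (occ vals)).headD [] := by
  induction S with
  | nil => rfl
  | cons x t ih =>
    simp only [List.map_cons, pyFirstWith, List.filter_cons]
    by_cases hx : (occ vals x).length = n
    · have : (vals.count x == n) = true := by simp [← length_occ, hx]
      simp [hx, this]
    · have : (vals.count x == n) = false := by simp [← length_occ]; omega
      simp [hx, this, ih]

theorem foldl_last_eq (vals : List Int) (S : List Int) (n : Nat) (a : List Int) :
    (S.map (fun r => (r, occ vals r))).foldl
      (fun (acc : List Int) p => if p.2.length = n then p.2 else acc) a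
    = ((S.filter (fun r => vals.count r == n)).map (occ vals)).getLastD a := by
  induction S generalizing a with
  | nil => rfl
  | cons x t ih =>
    simp only [List.map_cons, List.foldl_cons, List.filter_cons]
    by_cases hx : (occ vals x).length = n
    · have hc : (vals.count x == n) = true := by simp [← length_occ, hx]
      simp only [hx, if_pos rfl, hc, if_true]
      rw [ih]
      cases h : t.filter (fun r => vals.count r == n) with
      | nil => simp
      | cons y u =>
        cases h2 : (occ vals y :: List.map (occ vals) u).getLast? with
        | none => rw [List.getLast?_eq_none_iff] at h2; simp at h2
        | some z => simp [h2]
    · have hc : (vals.count x == n) = false := by simp [← length_occ]; omega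
      simp [hx, hc, ih]

theorem count_pair_le (vals : List Int) (r1 r2 : Int) (h : r1 ≠ r2) :
    vals.count r1 + vals.count r2 ≤ vals.length := by
  induction vals with
  | nil => simp
  | cons x t ih =>
    simp only [List.count_cons, List.length_cons]
    by_cases h1 : x = r1 <;> by_cases h2 : x = r2 <;> simp_all <;> omega

theorem any_occ_unique (vals : List Int) (n : Nat)
    (huniq : ∀ r1 r2, r1 ∈ vals → r2 ∈ vals → vals.count r1 = n → vals.count r2 = n → r1 = r2)
    (L : List Int)
    (hL : ((PySem.List.dedup vals).filter (fun r => vals.count r == n) = [] ∧ L = []) ∨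
          ∃ r0, vals.count r0 = n ∧ r0 ∈ vals ∧ L = occ vals r0)
    (j : Nat) (hj : j < vals.length) :
    L.any (fun i => i == (j : Int)) = (vals.count vals[j] == n) := by
  rcases hL with ⟨hf, rfl⟩ | ⟨r0, hc0, hm0, rfl⟩
  · simp only [List.any_nil]
    symm
    rw [beq_eq_false_iff_ne]
    intro hcj
    have : vals[j] ∈ (PySem.List.dedup vals).filter (fun r => vals.count r == n) := by
      rw [List.mem_filter, PySem.List.mem_dedup]
      exact ⟨List.getElem_mem hj, by simp [hcj]⟩
    rw [hf] at this
    simp at this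
  · by_cases hv : vals[j] = r0
    · have hmem : (j : Int) ∈ occ vals r0 := (mem_occ_iff vals r0 j).mpr ⟨hj, hv⟩
      rw [List.any_eq_true.mpr ⟨_, hmem, by simp⟩]
      simp [hv, hc0]
    · have hnm : (j : Int) ∉ occ vals r0 := by
        intro hmem
        exact hv ((mem_occ_iff vals r0 j).mp hmem).2
      have hany : (occ vals r0).any (fun i => i == (j : Int)) = false := by
        rw [List.any_eq_false]
        intro i hi
        simp only [beq_iff_eq]
        intro h; subst h; exact hnm hi
      rw [hany]
      symm
      rw [beq_eq_false_iff_ne]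
      intro hcj
      exact hv (huniq vals[j] r0 (List.getElem_mem hj) hm0 hcj hc0)

theorem any_flatMap_pairs (vals : List Int) (j : Nat) (hj : j < vals.length) :
    (((PySem.List.dedup vals).filter (fun r => vals.count r == 2)).flatMap (occ vals)).any
      (fun i => i == (j : Int)) = (vals.count vals[j] == 2) := by
  by_cases hc : vals.count vals[j] = 2
  · have hm : (j : Int) ∈ ((PySem.List.dedup vals).filter (fun r => vals.count r == 2)).flatMap (occ vals) := by
      rw [List.mem_flatMap]
      refine ⟨vals[j], ?_, (mem_occ_iff vals vals[j] j).mpr ⟨hj, rfl⟩⟩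
      rw [List.mem_filter, PySem.List.mem_dedup]
      exact ⟨List.getElem_mem hj, by simp [hc]⟩
    rw [List.any_eq_true.mpr ⟨_, hm, by simp⟩]
    simp [hc]
  · have : (((PySem.List.dedup vals).filter (fun r => vals.count r == 2)).flatMap (occ vals)).any
        (fun i => i == (j : Int)) = false := by
      rw [List.any_eq_false]
      intro i hi
      simp only [beq_iff_eq]
      intro h; subst h
      rw [List.mem_flatMap] at hi
      obtain ⟨r, hr, hocc⟩ := hi
      rw [List.mem_filter] at hr
      have hvr := ((mem_occ_iff vals r j).mp hocc).2
      simp only [beq_iff_eq] at hr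
      exact hc (hvr ▸ hr.2)
    rw [this]
    symm
    rw [beq_eq_false_iff_ne]
    exact fun h => hc h

theorem assemble (vals : List Int) (L : List Int) (wanted : List Int)
    (h0 : ∀ i ∈ L, 0 ≤ i ∧ i < (vals.length : Int))
    (hchar : ∀ (j : Nat) (hj : j < vals.length),
      L.any (fun i => i == (j : Int)) = wanted.contains ((vals.count vals[j] : Int))) :
    pySetTrues L = (PySem.List.pyRange 0 5 1).map (fun i =>
      decide (i < (((vals.map (fun v => (vals.count v : Int))).length : Nat) : Int)) &&
        wanted.contains (PySem.List.pyGetD (vals.map (fun v => (vals.count v : Int))) i 0)) := by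
  have hlenL : (pySetTrues L).length = 5 := by
    rw [pySetTrues, length_foldl_set, List.length_replicate]
  apply List.ext_getElem (by rw [hlenL, List.length_map, PySem.List.length_pyRange_one]; rfl)
  intro j hjl hjr
  have hj5 : j < 5 := by rwa [hlenL] at hjl
  have hgetA : (pySetTrues L)[j]'hjl = (false || L.any (fun i => i == (j : Int))) := by
    have h2 : j < (List.replicate 5 false).length := by rw [List.length_replicate]; exact hj5
    have := getElem_foldl_set L (List.replicate 5 false) (fun i hi => (h0 i hi).1) j h2
    calc (pySetTrues L)[j]'hjl
        = (List.foldl (fun r i => r.set i.toNat true) (List.replicate 5 false) L)[j]'(by rw [length_foldl_set]; exact h2) := rfl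
      _ = ((List.replicate 5 false)[j]'h2 || L.any (fun i => i == (j : Int))) := this
      _ = (false || L.any (fun i => i == (j : Int))) := by rw [List.getElem_replicate]
  rw [hgetA, Bool.false_or]
  rw [List.getElem_map, PySem.List.getElem_pyRange_one]
  have hidx : (0 : Int) + (j : Nat) = ((j : Nat) : Int) := by simp
  rw [hidx, PySem.List.pyGetD_natCast]
  by_cases hjv : j < vals.length
  · have hlt : decide (((j : Nat) : Int) < (((vals.map (fun v => (vals.count v : Int))).length : Nat) : Int)) = true := by
      simp [List.length_map]; exact_mod_cast hjv
    rw [hlt, Bool.true_and]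
    have hgd : (vals.map (fun v => (vals.count v : Int))).getD j 0 = (vals.count vals[j] : Int) := by
      rw [List.getD_eq_getElem?_getD, List.getElem?_map]
      simp [List.getElem?_eq_getElem hjv]
    rw [hgd]
    exact hchar j hjv
  · have hlt : decide (((j : Nat) : Int) < (((vals.map (fun v => (vals.count v : Int))).length : Nat) : Int)) = false := by
      simp [List.length_map]; exact_mod_cast Nat.not_lt.mp hjv
    rw [hlt, Bool.false_and]
    rw [List.any_eq_false]
    intro i hi
    have := (h0 i hi).2
    simp only [beq_iff_eq]
    intro h; subst h
    omega

theorem contains_single (v : Int) (n : Nat) (hv : v = (n : Int)) (c : Nat) :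
    ([v] : List Int).contains (c : Int) = (c == n) := by
  subst hv
  by_cases h : c = n
  · simp [h]
  · have h2 : ((c : Int) ≠ (n : Int)) := by exact_mod_cast h
    simp [h, h2]

theorem filter_sub_dedup (vals : List Int) (n : Nat)
    (huniq : ∀ r1 r2, r1 ∈ vals → r2 ∈ vals → vals.count r1 = n → vals.count r2 = n → r1 = r2) :
    (PySem.List.dedup vals).filter (fun r => vals.count r == n) = [] ∨
      ∃ r0, (PySem.List.dedup vals).filter (fun r => vals.count r == n) = [r0] ∧
        vals.count r0 = n ∧ r0 ∈ vals := by
  rcases filter_subsingleton (P := fun r => vals.count r == n) (PySem.List.nodup_dedup vals)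
      (fun r1 r2 h1 h2 p1 p2 => huniq r1 r2 ((PySem.List.mem_dedup vals r1).mp h1)
        ((PySem.List.mem_dedup vals r2).mp h2) (by simpa using p1) (by simpa using p2)) with
    h | ⟨r0, hf, hp, hm⟩
  · exact Or.inl h
  · exact Or.inr ⟨r0, hf, by simpa using hp, (PySem.List.mem_dedup vals r0).mp hm⟩

theorem hL_first (vals : List Int) (n : Nat)
    (huniq : ∀ r1 r2, r1 ∈ vals → r2 ∈ vals → vals.count r1 = n → vals.count r2 = n → r1 = r2) :
    ((PySem.List.dedup vals).filter (fun r => vals.count r == n) = [] ∧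
        pyFirstWith ((PySem.List.dedup vals).map (fun r => (r, occ vals r))) n = []) ∨
      ∃ r0, vals.count r0 = n ∧ r0 ∈ vals ∧
        pyFirstWith ((PySem.List.dedup vals).map (fun r => (r, occ vals r))) n = occ vals r0 := by
  rw [pyFirstWith_map]
  rcases filter_sub_dedup vals n huniq with h | ⟨r0, hf, hc, hm⟩
  · exact Or.inl ⟨h, by rw [h]; rfl⟩
  · exact Or.inr ⟨r0, hc, hm, by rw [hf]; rfl⟩

theorem hL_last (vals : List Int) (n : Nat)
    (huniq : ∀ r1 r2, r1 ∈ vals → r2 ∈ vals → vals.count r1 = n → vals.count r2 = n → r1 = r2) :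
    ((PySem.List.dedup vals).filter (fun r => vals.count r == n) = [] ∧
        ((PySem.List.dedup vals).map (fun r => (r, occ vals r))).foldl
          (fun (acc : List Int) p => if p.2.length = n then p.2 else acc) [] = []) ∨
      ∃ r0, vals.count r0 = n ∧ r0 ∈ vals ∧
        ((PySem.List.dedup vals).map (fun r => (r, occ vals r))).foldl
          (fun (acc : List Int) p => if p.2.length = n then p.2 else acc) [] = occ vals r0 := by
  rw [foldl_last_eq]
  rcases filter_sub_dedup vals n huniq with h | ⟨r0, hf, hc, hm⟩
  · exact Or.inl ⟨h, by rw [h]; rfl⟩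
  · exact Or.inr ⟨r0, hc, hm, by rw [hf]; rfl⟩

theorem bounds_of_hL (vals : List Int) (n : Nat) (L : List Int)
    (hL : ((PySem.List.dedup vals).filter (fun r => vals.count r == n) = [] ∧ L = []) ∨
          ∃ r0, vals.count r0 = n ∧ r0 ∈ vals ∧ L = occ vals r0) :
    ∀ i ∈ L, 0 ≤ i ∧ i < (vals.length : Int) := by
  rcases hL with ⟨-, rfl⟩ | ⟨r0, -, -, rfl⟩
  · intro i hi; simp at hi
  · exact fun i hi => mem_occ_bounds vals r0 i hi

theorem solveFirst (vals : List Int) (n : Nat) (wanted : List Int)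
    (huniq : ∀ r1 r2, r1 ∈ vals → r2 ∈ vals → vals.count r1 = n → vals.count r2 = n → r1 = r2)
    (hw : ∀ c : Nat, wanted.contains (c : Int) = (c == n)) :
    pySetTrues (pyFirstWith ((PySem.List.dedup vals).map (fun r => (r, occ vals r))) n)
    = (PySem.List.pyRange 0 5 1).map (fun i =>
      decide (i < (((vals.map (fun v => (vals.count v : Int))).length : Nat) : Int)) &&
        wanted.contains (PySem.List.pyGetD (vals.map (fun v => (vals.count v : Int))) i 0)) := by
  have hL := hL_first vals n huniq
  exact assemble vals _ wanted (bounds_of_hL vals n _ hL)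
    (fun j hj => by rw [any_occ_unique vals n huniq _ hL j hj, hw])

theorem solveFH (vals : List Int)
    (huniq3 : ∀ r1 r2, r1 ∈ vals → r2 ∈ vals → vals.count r1 = 3 → vals.count r2 = 3 → r1 = r2)
    (huniq2 : ∀ r1 r2, r1 ∈ vals → r2 ∈ vals → vals.count r1 = 2 → vals.count r2 = 2 → r1 = r2) :
    pySetTrues
      ((((PySem.List.dedup vals).map (fun r => (r, occ vals r))).foldl
          (fun (s : List Int × List Int) p =>
            if p.2.length = 3 then (p.2, s.2)
            else if p.2.length = 2 then (s.1, p.2)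
            else s) ([], [])).1 ++
        (((PySem.List.dedup vals).map (fun r => (r, occ vals r))).foldl
          (fun (s : List Int × List Int) p =>
            if p.2.length = 3 then (p.2, s.2)
            else if p.2.length = 2 then (s.1, p.2)
            else s) ([], [])).2)
    = (PySem.List.pyRange 0 5 1).map (fun i =>
      decide (i < (((vals.map (fun v => (vals.count v : Int))).length : Nat) : Int)) &&
        ([2, 3] : List Int).contains (PySem.List.pyGetD (vals.map (fun v => (vals.count v : Int))) i 0)) := by
  have hbody : (fun (s : List Int × List Int) (p : Int × List Int) =>
      if p.2.length = 3 then (p.2, s.2)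
      else if p.2.length = 2 then (s.1, p.2)
      else s)
      = (fun s p => ((fun (a : List Int) (p : Int × List Int) => if p.2.length = 3 then p.2 else a) s.1 p,
          (fun (a : List Int) (p : Int × List Int) => if p.2.length = 2 then p.2 else a) s.2 p)) := by
    funext s p
    by_cases h3 : p.2.length = 3
    · simp [h3]
    · by_cases h2 : p.2.length = 2
      · simp [h3, h2]
      · simp [h3, h2]
  rw [hbody, PySem.List.foldl_prod_mk
    (f := fun (a : List Int) (p : Int × List Int) => if p.2.length = 3 then p.2 else a)
    (g := fun (a : List Int) (p : Int × List Int) => if p.2.length = 2 then p.2 else a)]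
  have hL3 := hL_last vals 3 huniq3
  have hL2 := hL_last vals 2 huniq2
  apply assemble
  · intro i hi
    rw [List.mem_append] at hi
    rcases hi with hi | hi
    · exact bounds_of_hL vals 3 _ hL3 i hi
    · exact bounds_of_hL vals 2 _ hL2 i hi
  · intro j hj
    rw [List.any_append, any_occ_unique vals 3 huniq3 _ hL3 j hj,
      any_occ_unique vals 2 huniq2 _ hL2 j hj]
    by_cases h3 : vals.count vals[j] = 3
    · simp [h3]
    · by_cases h2 : vals.count vals[j] = 2
      · simp [h2]
      · have i3 : ((vals.count vals[j] : Int) ≠ (3 : Int)) := by exact_mod_cast h3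
        have i2 : ((vals.count vals[j] : Int) ≠ (2 : Int)) := by exact_mod_cast h2
        simp [h3, h2, i3, i2]

theorem solveTwoPair (vals : List Int) :
    pySetTrues
      (((PySem.List.dedup vals).map (fun r => (r, occ vals r))).foldl
        (fun (acc : List Int) p => if p.2.length = 2 then acc ++ p.2 else acc) [])
    = (PySem.List.pyRange 0 5 1).map (fun i =>
      decide (i < (((vals.map (fun v => (vals.count v : Int))).length : Nat) : Int)) &&
        ([(2 : Int)] : List Int).contains (PySem.List.pyGetD (vals.map (fun v => (vals.count v : Int))) i 0)) := by
  have hfold : ((PySem.List.dedup vals).map (fun r => (r, occ vals r))).foldl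
      (fun (acc : List Int) p => if p.2.length = 2 then acc ++ p.2 else acc) []
      = ((PySem.List.dedup vals).filter (fun r => vals.count r == 2)).flatMap (occ vals) := by
    rw [PySem.List.foldl_ite_eq_foldl_filter, PySem.List.foldl_append_eq_flatMap, List.nil_append]
    rw [List.filter_map, List.flatMap_map]
    congr 1
    apply List.filter_congr
    intro r _
    simp only [Function.comp, length_occ]
    by_cases h : vals.count r = 2
    · simp [h]
    · simp [h]
  rw [hfold]
  apply assemble
  · intro i hi
    rw [List.mem_flatMap] at hi
    obtain ⟨r, -, hocc⟩ := hi
    exact mem_occ_bounds vals r i hocc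
  · intro j hj
    rw [any_flatMap_pairs vals j hj]
    exact (contains_single 2 2 (by norm_num) _).symm

-- ===== VERDICT (by name: the statement is the Claim_ definition above) =====
theorem get_winning_cards_spec : Claim_equal_get_winning_cards := by
  intro cards hand_type hdom hpre
  obtain ⟨h5, hvalid, hcorner⟩ := hpre
  unfold Spec_get_winning_cards
  simp only [get_winning_cards, get_winning_cards_alt]
  rw [rank_values_eq, List.nil_append, List.map_map]
  have hmap : ((fun p : Int × Char => (p.1, charVal p.2)) ∘
      (fun p : Int × String => (p.1, (PySem.Str.pyGet? p.2 0).getD ' ')))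
      = (fun p : Int × String => (p.1, cardValue p.2)) := by
    funext p; simp [cardValue_eq_charVal]
  rw [hmap, ← enumerate_map cardValue cards 0, dict_items_eq]
  have h5v : (cards.map cardValue).length ≤ 5 := by rw [List.length_map]; exact h5
  have uniqBig : ∀ n : Nat, 3 ≤ n → ∀ r1 r2, r1 ∈ cards.map cardValue → r2 ∈ cards.map cardValue →
      (cards.map cardValue).count r1 = n → (cards.map cardValue).count r2 = n → r1 = r2 := by
    intro n hn r1 r2 h1 h2 hc1 hc2
    by_contra hne
    have := count_pair_le (cards.map cardValue) r1 r2 hne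
    omega
  have uniq2 : (hand_type = "One Pair" ∨ hand_type = "Full House") →
      ∀ r1 r2, r1 ∈ cards.map cardValue → r2 ∈ cards.map cardValue →
      (cards.map cardValue).count r1 = 2 → (cards.map cardValue).count r2 = 2 → r1 = r2 := by
    intro hht r1 r2 h1 h2 hc1 hc2
    have hpr : (pairRanks cards).length ≤ 1 := by
      by_contra hgt
      exact hcorner ⟨hht, by omega⟩
    have m1 : r1 ∈ pairRanks cards := by
      rw [pairRanks, List.mem_filter, PySem.List.mem_dedup]
      exact ⟨h1, by simp [hc1]⟩
    have m2 : r2 ∈ pairRanks cards := by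
      rw [pairRanks, List.mem_filter, PySem.List.mem_dedup]
      exact ⟨h2, by simp [hc2]⟩
    cases hl : pairRanks cards with
    | nil => rw [hl] at m1; simp at m1
    | cons x t =>
      rw [hl] at m1 m2 hpr
      have ht : t = [] := by
        simp only [List.length_cons] at hpr
        exact List.eq_nil_of_length_eq_zero (by omega)
      subst ht
      simp only [List.mem_singleton] at m1 m2
      rw [m1, m2]
  by_cases hRF : hand_type = "Royal Flush"
  · simp [hRF, List.replicate]
  by_cases hSF : hand_type = "Straight Flush"
  · simp [hSF, hRF, List.replicate]
  by_cases hF : hand_type = "Flush"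
  · simp [hF, hRF, hSF, List.replicate]
  by_cases hS : hand_type = "Straight"
  · simp [hS, hRF, hSF, hF, List.replicate]
  by_cases h4K : hand_type = "Four of a Kind"
  · simp only [hRF, hSF, hF, hS, h4K, if_false, if_true, or_self, or_false, false_or, if_pos,
      String.reduceEq]
    exact solveFirst _ 4 [4] (uniqBig 4 (by norm_num)) (contains_single 4 4 (by norm_num))
  by_cases hFH : hand_type = "Full House"
  · simp only [hRF, hSF, hF, hS, h4K, hFH, if_false, if_true, or_self, or_false, false_or, if_pos,
      String.reduceEq]
    exact solveFH _ (uniqBig 3 (by norm_num)) (uniq2 (Or.inr hFH))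
  by_cases h3K : hand_type = "Three of a Kind"
  · simp only [hRF, hSF, hF, hS, h4K, hFH, h3K, if_false, if_true, or_self, or_false, false_or,
      if_pos, String.reduceEq]
    exact solveFirst _ 3 [3] (uniqBig 3 (by norm_num)) (contains_single 3 3 (by norm_num))
  by_cases h2P : hand_type = "Two Pair"
  · simp only [hRF, hSF, hF, hS, h4K, hFH, h3K, h2P, if_false, if_true, or_self, or_false,
      false_or, if_pos, String.reduceEq]
    exact solveTwoPair _
  by_cases h1P : hand_type = "One Pair"
  · simp only [hRF, hSF, hF, hS, h4K, hFH, h3K, h2P, h1P, if_false, if_true, or_self, or_false,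
      false_or, if_pos, String.reduceEq]
    exact solveFirst _ 2 [2] (uniq2 (Or.inl h1P)) (contains_single 2 2 (by norm_num))
  · have hpr5 : PySem.List.pyRange 0 5 1 = [0, 1, 2, 3, 4] := by decide
    simp [hRF, hSF, hF, hS, h4K, hFH, h3K, h2P, h1P, hpr5]
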